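-- pv_equiv track=rewrite | github.com/theman8631/Kernos | kernos/kernel/compaction.py | _strip_fact_harvest
-- ===== SOURCE A (Python) =====
-- def _strip_fact_harvest(doc: str) -> str:
--     """Remove the FACT_HARVEST section from the document."""
--     lines = doc.rstrip().split("\n")
--     cleaned = []
--     in_harvest = False
--     for line in lines:
--         stripped = line.strip()
--         if stripped.upper().startswith("FACT_HARVEST:"):
--             in_harvest = True
--             continue
--         if in_harvest:
--             if stripped.upper().startswith(("ADD:", "UPDATE", "REINFORCE")) or not stripped:
--                 continue
--             else:
--                 in_harvest = False
--         if not in_harvest: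
--             cleaned.append(line)
--     return "\n".join(cleaned)
-- ===== SOURCE B (Python) =====
-- def _strip_fact_harvest(doc: str) -> str:
--     """Remove the FACT_HARVEST section from the document."""
--     lines = doc.rstrip().split("\n")
--
--     def is_header(line):
--         return line.strip().upper().startswith("FACT_HARVEST:")
--
--     def is_entry(line):
--         t = line.strip().upper()
--         return not t or t.startswith(("ADD:", "UPDATE", "REINFORCE"))
--
--     # stage 1: split the lines into sections at (and without) the header lines
--     sections = [[]]
--     for line in lines:
--         if is_header(line):
--             sections.append([])
--         else:
--             sections[-1].append(line)
--     # stage 2: every section that followed a header loses its leading run of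
--     # blank / harvest-entry lines; the rest of each section is kept verbatim
--     head, *tail = sections
--     kept = head
--     for sec in tail:
--         j = 0
--         while j < len(sec) and is_entry(sec[j]):
--             j += 1
--         kept = kept + sec[j:]
--     return "\n".join(kept)
-- ===== Notes on version B (the rewrite author's own statement) =====
-- stated objective: alternative
-- what changed: Replaced A's single-pass flag-driven state machine with staged passes: first split the lines into sections at the FACT_HARVEST header lines, then drop the leading run of blank/entry lines from every post-header section and concatenate.
import Mathlib
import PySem

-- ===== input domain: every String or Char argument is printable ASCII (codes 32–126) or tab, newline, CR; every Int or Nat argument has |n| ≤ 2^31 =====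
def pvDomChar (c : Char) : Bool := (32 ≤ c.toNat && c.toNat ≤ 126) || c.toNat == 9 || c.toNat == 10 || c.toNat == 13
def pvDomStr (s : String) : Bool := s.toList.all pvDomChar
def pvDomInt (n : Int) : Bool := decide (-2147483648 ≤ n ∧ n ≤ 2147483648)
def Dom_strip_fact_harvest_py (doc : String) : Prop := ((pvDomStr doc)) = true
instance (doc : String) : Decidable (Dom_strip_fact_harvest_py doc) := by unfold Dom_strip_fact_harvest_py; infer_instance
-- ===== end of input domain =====

-- B replaces A's single-pass flag-driven state machine by staged passes: first
-- split the lines into sections at the FACT_HARVEST header lines, then drop the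
-- leading run of blank/entry lines of every post-header section (alternative
-- decomposition, same cost); both are proved to return the same string.

-- ===== PORT A =====
-- one step of A's for-loop; state = (cleaned, in_harvest)
def stripFHstepA (st : List (List Char) × Bool) (line : List Char) : List (List Char) × Bool :=
  let stripped := PySem.Chars.strip line
  if PySem.Chars.startswith (PySem.Chars.upper stripped) "FACT_HARVEST:".toList then
    (st.1, true)
  else if st.2 && (PySem.Chars.startswith (PySem.Chars.upper stripped) "ADD:".toList
      || PySem.Chars.startswith (PySem.Chars.upper stripped) "UPDATE".toList
      || PySem.Chars.startswith (PySem.Chars.upper stripped) "REINFORCE".toList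
      || stripped == []) then
    (st.1, true)
  else
    (st.1 ++ [line], false)

def strip_fact_harvest_py (doc : String) : String :=
  String.ofList (PySem.Chars.join "\n".toList
    (((PySem.Chars.splitOn (PySem.Chars.rstrip doc.toList) "\n".toList).foldl
        stripFHstepA ([], false)).1))

-- ===== PORT B =====
-- is_header
def stripFHisHeader (l : List Char) : Bool :=
  PySem.Chars.startswith (PySem.Chars.upper (PySem.Chars.strip l)) "FACT_HARVEST:".toList

-- is_entry
def stripFHisEntry (l : List Char) : Bool :=
  let t := PySem.Chars.upper (PySem.Chars.strip l)
  t == [] || PySem.Chars.startswith t "ADD:".toList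
    || PySem.Chars.startswith t "UPDATE".toList
    || PySem.Chars.startswith t "REINFORCE".toList

-- sections[-1].append(line)
def stripFHappendLast : List (List (List Char)) → List Char → List (List (List Char))
  | [], l => [[l]]      -- unreachable: the section list starts non-empty
  | [s], l => [s ++ [l]]
  | s :: rest, l => s :: stripFHappendLast rest l

-- stage-1 loop body: start a new section at a header, else extend the last one
def stripFHsplitStep (secs : List (List (List Char))) (l : List Char) : List (List (List Char)) :=
  if stripFHisHeader l then secs ++ [[]] else stripFHappendLast secs l

-- stage-2 inner while loop: j past the leading entry run, then sec[j:]
def stripFHskip : List (List Char) → List (List Char)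
  | [] => []
  | l :: r => if stripFHisEntry l then stripFHskip r else l :: r

-- the 'head, *tail' destructuring plus the stage-2 concatenation loop
def stripFHkept : List (List (List Char)) → List (List Char)
  | [] => []          -- unreachable: the section list is never empty
  | head :: tail => tail.foldl (fun k s => k ++ stripFHskip s) head

def strip_fact_harvest_py_alt (doc : String) : String :=
  String.ofList (PySem.Chars.join "\n".toList
    (stripFHkept
      (((PySem.Chars.splitOn (PySem.Chars.rstrip doc.toList) "\n".toList).foldl
          stripFHsplitStep [[]]))))

-- ===== PRECONDITION & SPEC =====
def Spec_strip_fact_harvest_py (doc : String) (out : String) : Prop := out = strip_fact_harvest_py_alt doc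
instance (doc : String) (out : String) : Decidable (Spec_strip_fact_harvest_py doc out) := by unfold Spec_strip_fact_harvest_py; infer_instance

-- ===== CLAIM (what is proved, stated in full; the proofs are below) =====
def Claim_equal_strip_fact_harvest_py : Prop := ∀ (doc : String), Dom_strip_fact_harvest_py doc → Spec_strip_fact_harvest_py doc (strip_fact_harvest_py doc)

-- ===== LEMMAS AND PROOFS =====

-- recursive characterisation of stage 1: (first section, later sections)
def stripFHsplitRec : List (List Char) → List (List Char) × List (List (List Char))
  | [] => ([], [])
  | l :: r =>
    if stripFHisHeader l then ([], (stripFHsplitRec r).1 :: (stripFHsplitRec r).2)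
    else (l :: (stripFHsplitRec r).1, (stripFHsplitRec r).2)

theorem appendLast_eq (secs : List (List (List Char))) (cur : List (List Char)) (l : List Char) :
    stripFHappendLast (secs ++ [cur]) l = secs ++ [cur ++ [l]] := by
  induction secs with
  | nil => rfl
  | cons s rest ih =>
    obtain ⟨b, t, hbt⟩ : ∃ b t, rest ++ [cur] = b :: t := by
      cases rest <;> exact ⟨_, _, rfl⟩
    have h3 : stripFHappendLast (s :: (rest ++ [cur])) l
        = s :: stripFHappendLast (rest ++ [cur]) l := by
      rw [hbt]; rfl
    rw [List.cons_append, h3, ih]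
    simp

-- stage 1's foldl computes stripFHsplitRec
theorem splitStep_fold (ls : List (List Char)) : ∀ (secs : List (List (List Char)))
    (cur : List (List Char)),
    ls.foldl stripFHsplitStep (secs ++ [cur])
      = secs ++ (cur ++ (stripFHsplitRec ls).1) :: (stripFHsplitRec ls).2 := by
  induction ls with
  | nil => intro secs cur; simp [stripFHsplitRec]
  | cons l r ih =>
    intro secs cur
    by_cases h : stripFHisHeader l = true
    · have : stripFHsplitStep (secs ++ [cur]) l = (secs ++ [cur]) ++ [[]] := by
        simp [stripFHsplitStep, h]
      rw [List.foldl_cons, this, ih (secs ++ [cur]) []]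
      simp [stripFHsplitRec, h]
    · have : stripFHsplitStep (secs ++ [cur]) l = secs ++ [cur ++ [l]] := by
        simp [stripFHsplitStep, h, appendLast_eq]
      rw [List.foldl_cons, this, ih secs (cur ++ [l])]
      simp [stripFHsplitRec, h]

-- the core invariant: A's fold from either flag state equals B's staged passes
theorem foldA_eq (ls : List (List Char)) : ∀ acc : List (List Char),
    ((ls.foldl stripFHstepA (acc, false)).1
      = acc ++ (stripFHsplitRec ls).1 ++ (stripFHsplitRec ls).2.flatMap stripFHskip)
    ∧ ((ls.foldl stripFHstepA (acc, true)).1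
      = acc ++ stripFHskip (stripFHsplitRec ls).1 ++ (stripFHsplitRec ls).2.flatMap stripFHskip) := by
  induction ls with
  | nil => intro acc; simp [stripFHsplitRec, stripFHskip]
  | cons l r ih =>
    intro acc
    by_cases h1 : stripFHisHeader l = true
    · -- header: A sets the flag; B starts a new section
      have hstep : ∀ b, stripFHstepA (acc, b) l = (acc, true) := by
        intro b
        simp only [stripFHstepA]
        rw [if_pos (by simpa [stripFHisHeader] using h1)]
      constructor <;>
        simp [List.foldl_cons, hstep, (ih acc).2, stripFHsplitRec, h1, stripFHskip,
          List.append_assoc]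
    · by_cases h2 : stripFHisEntry l = true
      · -- blank / entry line: skipped only while the flag is set
        have hA : (PySem.Chars.startswith (PySem.Chars.upper (PySem.Chars.strip l)) "ADD:".toList
            || PySem.Chars.startswith (PySem.Chars.upper (PySem.Chars.strip l)) "UPDATE".toList
            || PySem.Chars.startswith (PySem.Chars.upper (PySem.Chars.strip l)) "REINFORCE".toList
            || (PySem.Chars.strip l == [])) = true := by
          have hb : (PySem.Chars.upper (PySem.Chars.strip l) == ([] : List Char))
              = (PySem.Chars.strip l == []) := by
            cases PySem.Chars.strip l <;> simp [PySem.Chars.upper]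
          simp only [stripFHisEntry, hb, Bool.or_eq_true, beq_iff_eq] at h2 ⊢
          tauto
        have hstepT : stripFHstepA (acc, true) l = (acc, true) := by
          simp only [stripFHstepA]
          rw [if_neg (by simpa [stripFHisHeader] using h1)]
          simp only [Bool.true_and]
          rw [if_pos hA]
        have hstepF : stripFHstepA (acc, false) l = (acc ++ [l], false) := by
          simp only [stripFHstepA]
          rw [if_neg (by simpa [stripFHisHeader] using h1)]
          simp
        constructor
        · rw [List.foldl_cons, hstepF, (ih (acc ++ [l])).1]
          simp [stripFHsplitRec, h1]
        · rw [List.foldl_cons, hstepT, (ih acc).2]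
          simp [stripFHsplitRec, h1, stripFHskip, h2]
      · -- ordinary line: kept from either state, and it ends any harvest section
        have hA : (PySem.Chars.startswith (PySem.Chars.upper (PySem.Chars.strip l)) "ADD:".toList
            || PySem.Chars.startswith (PySem.Chars.upper (PySem.Chars.strip l)) "UPDATE".toList
            || PySem.Chars.startswith (PySem.Chars.upper (PySem.Chars.strip l)) "REINFORCE".toList
            || (PySem.Chars.strip l == [])) = false := by
          have hb : (PySem.Chars.upper (PySem.Chars.strip l) == ([] : List Char))
              = (PySem.Chars.strip l == []) := by
            cases PySem.Chars.strip l <;> simp [PySem.Chars.upper]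
          rw [Bool.eq_false_iff]
          intro hx
          apply h2
          simp only [stripFHisEntry, hb, Bool.or_eq_true, beq_iff_eq] at hx ⊢
          tauto
        have hstep : ∀ b, stripFHstepA (acc, b) l = (acc ++ [l], false) := by
          intro b
          simp only [stripFHstepA]
          rw [if_neg (by simpa [stripFHisHeader] using h1)]
          cases b
          · simp
          · simp only [Bool.true_and]; rw [if_neg (by rw [hA]; exact Bool.false_ne_true)]
        constructor
        · rw [List.foldl_cons, hstep, (ih (acc ++ [l])).1]
          simp [stripFHsplitRec, h1]
        · rw [List.foldl_cons, hstep, (ih (acc ++ [l])).1]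
          simp [stripFHsplitRec, h1, stripFHskip, h2]

-- ===== VERDICT (by name: the statement is the Claim_ definition above) =====
theorem strip_fact_harvest_py_spec : Claim_equal_strip_fact_harvest_py := by
  intro doc _
  unfold Spec_strip_fact_harvest_py strip_fact_harvest_py strip_fact_harvest_py_alt
  rw [(foldA_eq (PySem.Chars.splitOn (PySem.Chars.rstrip doc.toList) "\n".toList) []).1,
    show ([[]] : List (List (List Char))) = [] ++ [[]] from rfl, splitStep_fold]
  simp [stripFHkept, List.flatMap_def]
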